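-- pv_equiv track=rewrite | github.com/carelessty/ECE6254 | src/data_utils.py | _process_raw_text_split
-- ===== SOURCE A (Python) =====
-- from typing import Dict, List, Optional, Tuple, Union
--
-- def _process_raw_text_split(raw_text_lines: List[str]) -> List[Dict[str, List[str]]]:
--     """
--     Processes raw CoNLL lines for a split into examples based on separators.
--
--     Args:
--         raw_text_lines: A list of strings, where each string is a line from the CoNLL file.
--
--     Returns:
--         A list of dictionaries, where each dictionary represents an example
--         (sentence/document) with 'tokens' and 'tags' keys.
--     """
--     examples = []
--     current_tokens = []
--     current_tags = []
--
--     for line in raw_text_lines: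
--         line = line.strip()
--         # Ignore document markers for now, they don't separate examples in this context
--         if ".txt" in line:
--             continue
--         # [SEP] or empty line acts as a separator between examples
--         elif not line or line == "[SEP]":
--             if current_tokens:  # Ensure we don't add empty examples
--                 examples.append({"tokens": list(current_tokens), "tags": list(current_tags)})
--                 current_tokens = []
--                 current_tags = []
--         # Process lines with token and tag
--         else:
--             parts = line.rsplit(" ", 1)
--             if len(parts) == 2:
--                 token, tag = parts
--             else:
--                 # Handle potential missing tags, default to 'O'
--                 token, tag = parts[0], "O"
--                 # Log a warning if a tag is missing
--                 # logger.warning(f"Line missing tag, defaulting to 'O': {line}") # Optional: uncomment for debugging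
--             current_tokens.append(token)
--             current_tags.append(tag)
--
--     # Add the last example if the file doesn't end with a separator
--     if current_tokens:
--         examples.append({"tokens": list(current_tokens), "tags": list(current_tags)})
--
--     return examples
-- ===== SOURCE B (Python) =====
-- def _parse(line):
--     parts = line.rsplit(" ", 1)
--     return (parts[0], parts[1]) if len(parts) == 2 else (parts[0], "O")
--
--
-- def _process_raw_text_split(raw_text_lines):
--     cleaned = [s for s in (ln.strip() for ln in raw_text_lines) if ".txt" not in s]
--     segments = [[]]
--     for s in cleaned:
--         if s == "" or s == "[SEP]":
--             segments.append([])
--         else: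
--             segments[-1].append(s)
--     return [{"tokens": [_parse(s)[0] for s in seg],
--              "tags": [_parse(s)[1] for s in seg]}
--             for seg in segments if seg]
-- ===== Notes on version B (the rewrite author's own statement) =====
-- stated objective: simpler
-- what changed: Replaced A's single loop with mutable current_tokens/current_tags accumulators and flush-on-separator logic by a three-stage pipeline: strip-and-filter the lines, group them into segments cut at empty/'[SEP]' lines, then map each non-empty segment to its example via a shared per-line parser.
import Mathlib
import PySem

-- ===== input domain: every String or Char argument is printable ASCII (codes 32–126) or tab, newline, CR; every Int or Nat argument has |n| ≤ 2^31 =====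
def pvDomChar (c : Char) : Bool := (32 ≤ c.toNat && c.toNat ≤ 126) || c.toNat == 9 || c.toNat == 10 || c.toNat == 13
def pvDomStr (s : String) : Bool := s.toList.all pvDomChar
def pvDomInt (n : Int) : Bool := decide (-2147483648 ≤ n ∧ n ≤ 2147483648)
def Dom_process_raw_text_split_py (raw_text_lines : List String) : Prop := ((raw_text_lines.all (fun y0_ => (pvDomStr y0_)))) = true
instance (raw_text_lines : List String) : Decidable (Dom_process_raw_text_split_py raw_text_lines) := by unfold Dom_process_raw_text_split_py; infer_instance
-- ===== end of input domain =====

-- B replaces A's mutable accumulate/flush loop by a pipeline (strip+filter, group into segments, map each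
-- non-empty segment to an example); objective: simpler decomposition, same cost.

-- hand port of line.rsplit(" ", 1) on the character list (exact: splits at the LAST space, at most once)
def pyRsplitSp1 : List Char → List (List Char)
  | [] => [[]]
  | c :: rest =>
    match pyRsplitSp1 rest with
    | [one] => if c = ' ' then [[], one] else [c :: one]
    | [a, b] => [c :: a, b]
    | other => other

-- parts = line.rsplit(" ", 1); (parts[0], parts[1]) if len(parts) == 2 else (parts[0], "O")
def parseLine (l : String) : String × String :=
  match pyRsplitSp1 l.toList with
  | [t, g] => (String.ofList t, String.ofList g)
  | parts => (String.ofList (parts.headD []), "O")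

-- ===== PORT A =====
def stepA (st : List (List (String × List String)) × List String × List String) (line : String) :
    List (List (String × List String)) × List String × List String :=
  let l := PySem.Str.strip line
  if PySem.Str.isIn ".txt" l then st
  else if l == "" || l == "[SEP]" then
    if !st.2.1.isEmpty then (st.1 ++ [[("tokens", st.2.1), ("tags", st.2.2)]], [], [])
    else st
  else
    let tg := parseLine l
    (st.1, st.2.1 ++ [tg.1], st.2.2 ++ [tg.2])

def process_raw_text_split_py (raw_text_lines : List String) : List (List (String × List String)) :=
  let st := raw_text_lines.foldl stepA ([], [], [])
  if !st.2.1.isEmpty then st.1 ++ [[("tokens", st.2.1), ("tags", st.2.2)]] else st.1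

-- ===== PORT B =====
def mkExample (seg : List String) : List (String × List String) :=
  [("tokens", seg.map (fun s => (parseLine s).1)), ("tags", seg.map (fun s => (parseLine s).2))]

def process_raw_text_split_py_alt (raw_text_lines : List String) : List (List (String × List String)) :=
  let cleaned := (raw_text_lines.map (fun l => PySem.Str.strip l)).filter
      (fun s => !PySem.Str.isIn ".txt" s)
  let segments := cleaned.foldl (fun segs s =>
      if s == "" || s == "[SEP]" then segs ++ [[]]
      else segs.dropLast ++ [segs.getLastD [] ++ [s]]) [[]]
  segments.foldl (fun acc seg => if !seg.isEmpty then acc ++ [mkExample seg] else acc) []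

-- ===== PRECONDITION & SPEC =====
def Spec_process_raw_text_split_py (raw_text_lines : List String) (out : List (List (String × List String))) : Prop := out = process_raw_text_split_py_alt raw_text_lines
instance (raw_text_lines : List String) (out : List (List (String × List String))) : Decidable (Spec_process_raw_text_split_py raw_text_lines out) := by unfold Spec_process_raw_text_split_py; infer_instance

-- ===== CLAIM (what is proved, stated in full; the proofs are below) =====
def Claim_equal_process_raw_text_split_py : Prop := ∀ (raw_text_lines : List String), Dom_process_raw_text_split_py raw_text_lines → Spec_process_raw_text_split_py raw_text_lines (process_raw_text_split_py raw_text_lines)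

-- ===== LEMMAS AND PROOFS =====

-- A's final flush, named for the proofs
def finishA (st : List (List (String × List String)) × List String × List String) :
    List (List (String × List String)) :=
  if !st.2.1.isEmpty then st.1 ++ [[("tokens", st.2.1), ("tags", st.2.2)]] else st.1

-- reference segmentation: the segments B's grouping fold produces, as a structural recursion
def segsFrom (cur : List String) : List String → List (List String)
  | [] => [cur]
  | s :: rest => if s == "" || s == "[SEP]" then cur :: segsFrom [] rest else segsFrom (cur ++ [s]) rest

theorem segFold_eq (cleaned : List String) :
    ∀ (init : List (List String)) (cur : List String),
    cleaned.foldl (fun segs s =>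
      if s == "" || s == "[SEP]" then segs ++ [[]]
      else segs.dropLast ++ [segs.getLastD [] ++ [s]]) (init ++ [cur])
    = init ++ segsFrom cur cleaned := by
  induction cleaned with
  | nil => intro init cur; simp [segsFrom]
  | cons s rest ih =>
    intro init cur
    by_cases h : (s == "" || s == "[SEP]") = true
    · simp only [List.foldl_cons, h, if_pos, segsFrom]
      rw [show init ++ [cur] ++ [([] : List String)] = (init ++ [cur]) ++ [[]] from rfl,
        ih (init ++ [cur]) []]
      simp
    · simp only [List.foldl_cons, h, if_neg, segsFrom, Bool.not_eq_true]
      rw [List.dropLast_concat, List.getLastD_concat, ih init (cur ++ [s])]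

-- main invariant: A's fold started at (ex, cur's tokens, cur's tags), then flushed, equals
-- ex ++ the examples built from the segments of the cleaned remaining lines, started at cur
theorem loopA_eq (lines : List String) :
    ∀ (ex : List (List (String × List String))) (cur : List String),
    finishA (lines.foldl stepA
      (ex, cur.map (fun s => (parseLine s).1), cur.map (fun s => (parseLine s).2)))
    = ex ++ ((segsFrom cur ((lines.map (fun l => PySem.Str.strip l)).filter
        (fun s => !PySem.Str.isIn ".txt" s))).filter (fun s => !s.isEmpty)).map mkExample := by
  induction lines with
  | nil =>
    intro ex cur
    cases cur with
    | nil => simp [segsFrom, finishA]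
    | cons c cs => simp [segsFrom, finishA, mkExample]
  | cons line rest ih =>
    intro ex cur
    simp only [List.map_cons, List.filter_cons, List.foldl_cons]
    by_cases htxt : PySem.Str.isIn ".txt" (PySem.Str.strip line) = true
    · simp only [stepA, htxt, if_pos, Bool.not_true, Bool.false_eq_true]
      exact ih ex cur
    · have htxt' : PySem.Chars.isIn ['.', 't', 'x', 't'] (PySem.Chars.strip line.toList) = false := by
        simpa using htxt
      by_cases hsep : ((PySem.Str.strip line) == "" || (PySem.Str.strip line) == "[SEP]") = true
      · cases hc : cur with
        | nil =>
          have h2 := ih ex []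
          simp only [List.map_nil] at h2
          simpa [stepA, htxt', hsep, segsFrom, List.append_assoc] using h2
        | cons c cs =>
          have h2 := ih (ex ++ [[("tokens", ((c :: cs).map (fun s => (parseLine s).1))),
              ("tags", ((c :: cs).map (fun s => (parseLine s).2)))]]) []
          simp only [List.map_nil, List.map_cons] at h2
          simpa [stepA, htxt', hsep, segsFrom, mkExample, List.append_assoc] using h2
      · have h2 := ih ex (cur ++ [PySem.Str.strip line])
        simp only [List.map_append, List.map_cons, List.map_nil] at h2
        simpa [stepA, htxt', hsep, segsFrom, List.append_assoc] using h2

-- ===== VERDICT (by name: the statement is the Claim_ definition above) =====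
theorem process_raw_text_split_py_spec : Claim_equal_process_raw_text_split_py := by
  intro lines _
  show process_raw_text_split_py lines = process_raw_text_split_py_alt lines
  have hA : process_raw_text_split_py lines = finishA (lines.foldl stepA ([], [], [])) := rfl
  have hB : process_raw_text_split_py_alt lines
      = (((lines.map (fun l => PySem.Str.strip l)).filter
          (fun s => !PySem.Str.isIn ".txt" s)).foldl (fun segs s =>
            if s == "" || s == "[SEP]" then segs ++ [[]]
            else segs.dropLast ++ [segs.getLastD [] ++ [s]]) ([] ++ [[]])).foldl
          (fun acc seg => if !seg.isEmpty then acc ++ [mkExample seg] else acc) [] := rfl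
  rw [hA, hB, segFold_eq _ [] [],
    PySem.List.foldl_append_if (fun seg => !seg.isEmpty) mkExample]
  have h0 := loopA_eq lines [] []
  simp only [List.map_nil] at h0
  rw [h0]
  simp
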